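-- pv_equiv track=rewrite | github.com/Lance52259/hcbp-scripts-lint | rules/io_rules/rule_007.py | _remove_comments_for_parsing
-- ===== SOURCE A (Python) =====
-- def _remove_comments_for_parsing(content: str) -> str:
--     """
--     Remove comments from content for parsing, but preserve line structure.
--
--     This helper function removes all comments from the Terraform content
--     while maintaining the line structure for accurate parsing.
--
--     Args:
--         content (str): The original file content
--
--     Returns:
--         str: Content with comments removed
--     """
--     lines = content.split('\n')
--     cleaned_lines = []
--
--     for line in lines:
--         # Remove comments but keep the line structure
--         if '#' in line:
--             # Find the first # that's not inside quotes
--             in_quotes = False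
--             quote_char = None
--             for i, char in enumerate(line):
--                 if char in ['"', "'"] and (i == 0 or line[i-1] != '\\'):
--                     if not in_quotes:
--                         in_quotes = True
--                         quote_char = char
--                     elif char == quote_char:
--                         in_quotes = False
--                         quote_char = None
--                 elif char == '#' and not in_quotes:
--                     line = line[:i]
--                     break
--         cleaned_lines.append(line)
--
--     return '\n'.join(cleaned_lines)
-- ===== SOURCE B (Python) =====
-- def _remove_comments_for_parsing(content: str) -> str:
--     """Streaming single-pass rewrite: one state machine over the whole string,
--     no split/join, state reset at each newline."""
--     out = []
--     in_quotes = False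
--     quote_char = None
--     comment = False
--     prev = None
--     for ch in content:
--         if ch == '\n':
--             out.append(ch)
--             in_quotes = False
--             quote_char = None
--             comment = False
--             prev = None
--         elif comment:
--             pass
--         elif ch in ('"', "'") and prev != '\\':
--             if not in_quotes:
--                 in_quotes = True
--                 quote_char = ch
--             elif ch == quote_char:
--                 in_quotes = False
--                 quote_char = None
--             out.append(ch)
--             prev = ch
--         elif ch == '#' and not in_quotes:
--             comment = True
--         else:
--             out.append(ch)
--             prev = ch
--     return ''.join(out)
-- ===== Notes on version B (the rewrite author's own statement) =====
-- stated objective: alternative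
-- what changed: Replaced A's split-into-lines, per-line indexed rescan (guarded by a hash-membership test, with slice truncation) and newline join by a single streaming state machine over the whole string that resets its quote/comment state at each newline and emits the output in one pass.
import Mathlib
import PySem

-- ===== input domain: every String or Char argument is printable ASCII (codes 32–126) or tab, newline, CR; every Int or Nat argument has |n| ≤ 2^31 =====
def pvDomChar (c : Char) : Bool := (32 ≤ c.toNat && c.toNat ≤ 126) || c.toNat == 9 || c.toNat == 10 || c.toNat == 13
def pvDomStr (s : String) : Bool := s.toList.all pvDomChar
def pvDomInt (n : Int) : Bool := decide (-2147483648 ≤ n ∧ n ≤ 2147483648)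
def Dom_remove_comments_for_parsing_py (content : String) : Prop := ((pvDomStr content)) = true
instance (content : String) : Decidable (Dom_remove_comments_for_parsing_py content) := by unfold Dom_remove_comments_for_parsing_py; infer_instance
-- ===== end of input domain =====

-- B is an alternative decomposition: one streaming state machine over the whole
-- string (state reset at each newline) instead of A's split / per-line rescan / join.

-- ===== PORT A =====
-- content.split('\n'): split a char list at every '\n'
def pvSplitNL : List Char → List (List Char)
  | [] => [[]]
  | c :: rest =>
    if c = '\n' then [] :: pvSplitNL rest
    else
      match pvSplitNL rest with
      | [] => [[c]]        -- unreachable: pvSplitNL never returns []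
      | h :: t => (c :: h) :: t

-- '\n'.join(lines)
def pvJoinNL : List (List Char) → List Char
  | [] => []
  | [a] => a
  | a :: b :: t => a ++ '\n' :: pvJoinNL (b :: t)

-- A's inner loop: for i, char in enumerate(line): …  (line is the full line,
-- i the enumerate index, scanning the remaining suffix; line[i-1] is
-- getElem? line (i-1), in range whenever A evaluates it)
def pvAScan (line : List Char) (inq : Bool) (qc : Option Char) (i : Nat) : List Char → List Char
  | [] => line
  | c :: rs =>
    if (c = '"' ∨ c = '\'') ∧ (i = 0 ∨ getElem? line (i - 1) ≠ some '\\') then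
      if !inq then pvAScan line true (some c) (i+1) rs
      else if some c = qc then pvAScan line false none (i+1) rs
      else pvAScan line inq qc (i+1) rs
    else if c = '#' ∧ inq = false then line.take i   -- line = line[:i]; break
    else pvAScan line inq qc (i+1) rs

def pvProcLine (line : List Char) : List Char :=
  if '#' ∈ line then pvAScan line false none 0 line else line

def remove_comments_for_parsing_py (content : String) : String :=
  String.ofList (pvJoinNL ((pvSplitNL content.toList).map pvProcLine))

-- ===== PORT B =====
-- single streaming state machine; state resets at '\n'
def pvBGo (inq : Bool) (qc : Option Char) (comment : Bool) (prev : Option Char) : List Char → List Char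
  | [] => []
  | c :: rs =>
    if c = '\n' then '\n' :: pvBGo false none false none rs
    else if comment then pvBGo inq qc comment prev rs
    else if (c = '"' ∨ c = '\'') ∧ prev ≠ some '\\' then
      c :: (if !inq then pvBGo true (some c) comment (some c) rs
            else if some c = qc then pvBGo false none comment (some c) rs
            else pvBGo inq qc comment (some c) rs)
    else if c = '#' ∧ inq = false then pvBGo inq qc true prev rs
    else c :: pvBGo inq qc comment (some c) rs

def remove_comments_for_parsing_py_alt (content : String) : String :=
  String.ofList (pvBGo false none false none content.toList)

-- ===== PRECONDITION & SPEC =====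
def Spec_remove_comments_for_parsing_py (content : String) (out : String) : Prop := out = remove_comments_for_parsing_py_alt content
instance (content : String) (out : String) : Decidable (Spec_remove_comments_for_parsing_py content out) := by unfold Spec_remove_comments_for_parsing_py; infer_instance

-- ===== CLAIM (what is proved, stated in full; the proofs are below) =====
def Claim_equal_remove_comments_for_parsing_py : Prop := ∀ (content : String), Dom_remove_comments_for_parsing_py content → Spec_remove_comments_for_parsing_py content (remove_comments_for_parsing_py content)

-- ===== LEMMAS AND PROOFS =====

-- the tail seen by the per-line machine: either end of input or a '\n' boundary
def pvTailOK (tail : List Char) : Prop := tail = [] ∨ ∃ l₂, tail = '\n' :: l₂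

def pvBNL : List Char → List Char
  | [] => []
  | _ :: l₂ => '\n' :: pvBGo false none false none l₂

theorem pvBGo_tail (tail : List Char) (h : pvTailOK tail)
    (inq : Bool) (qc : Option Char) (cm : Bool) (prev : Option Char) :
    pvBGo inq qc cm prev tail = pvBNL tail := by
  rcases h with h | ⟨l₂, h⟩ <;> subst h <;> simp [pvBGo, pvBNL]

theorem pvBGo_skip (rest : List Char) (hn : '\n' ∉ rest) (tail : List Char)
    (inq : Bool) (qc : Option Char) (prev : Option Char) :
    pvBGo inq qc true prev (rest ++ tail) = pvBGo inq qc true prev tail := by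
  induction rest with
  | nil => rfl
  | cons c rs ih =>
      have hc : c ≠ '\n' := fun h => hn (h ▸ List.mem_cons_self ..)
      have : '\n' ∉ rs := fun h => hn (List.mem_cons_of_mem _ h)
      simp [pvBGo, hc, ih this]

theorem pvPrev_cond (pre rest : List Char) :
    (pre.length = 0 ∨ getElem? (pre ++ rest) (pre.length - 1) ≠ some '\\') ↔ pre.getLast? ≠ some '\\' := by
  cases pre with
  | nil => simp
  | cons a as =>
    have h1 : (a :: as).length - 1 < (a :: as).length := by simp
    rw [List.getElem?_append_left h1, ← List.getLast?_eq_getElem?]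
    simp

theorem pvCore (rest : List Char) (hn : '\n' ∉ rest) (pre tail : List Char)
    (ht : pvTailOK tail) (inq : Bool) (qc : Option Char) :
    pre ++ pvBGo inq qc false pre.getLast? (rest ++ tail)
      = pvAScan (pre ++ rest) inq qc pre.length rest ++ pvBNL tail := by
  induction rest generalizing pre inq qc with
  | nil =>
      simp [pvAScan, pvBGo_tail tail ht]
  | cons c rs ih =>
      have hc : ¬ c = '\n' := fun h => hn (h ▸ List.mem_cons_self ..)
      have hrs : '\n' ∉ rs := fun h => hn (List.mem_cons_of_mem _ h)
      have hlast : (pre ++ [c]).getLast? = some c := List.getLast?_concat ..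
      have hlen : (pre ++ [c]).length = pre.length + 1 := by simp
      rw [List.cons_append, pvBGo, pvAScan]
      by_cases hq : (c = '"' ∨ c = '\'') ∧ pre.getLast? ≠ some '\\'
      · have hqa : (c = '"' ∨ c = '\'') ∧ (pre.length = 0 ∨ getElem? (pre ++ c :: rs) (pre.length - 1) ≠ some '\\') :=
          ⟨hq.1, (pvPrev_cond pre (c :: rs)).mpr hq.2⟩
        rw [if_neg hc, if_neg (by simp), if_pos hq, if_pos hqa]
        cases inq with
        | false =>
            have h := ih hrs (pre ++ [c]) true (some c)
            rw [hlast, hlen] at h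
            simpa using h
        | true =>
            by_cases hqc : some c = qc
            · have h := ih hrs (pre ++ [c]) false none
              rw [hlast, hlen] at h
              simpa [hqc] using h
            · have h := ih hrs (pre ++ [c]) true qc
              rw [hlast, hlen] at h
              simpa [hqc] using h
      · have hqa : ¬ ((c = '"' ∨ c = '\'') ∧ (pre.length = 0 ∨ getElem? (pre ++ c :: rs) (pre.length - 1) ≠ some '\\')) :=
          fun h => hq ⟨h.1, (pvPrev_cond pre (c :: rs)).mp h.2⟩
        rw [if_neg hc, if_neg (by simp), if_neg hq, if_neg hqa]
        by_cases hsh : c = '#' ∧ inq = false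
        · rw [if_pos hsh, if_pos hsh]
          rw [pvBGo_skip rs hrs tail, pvBGo_tail tail ht, List.take_left' rfl]
        · rw [if_neg hsh, if_neg hsh]
          have h := ih hrs (pre ++ [c]) inq qc
          rw [hlast, hlen] at h
          simpa using h

theorem pvAScan_no_hash (rest : List Char) (h : '#' ∉ rest) (line : List Char)
    (inq : Bool) (qc : Option Char) (i : Nat) :
    pvAScan line inq qc i rest = line := by
  induction rest generalizing inq qc i with
  | nil => simp [pvAScan]
  | cons c rs ih =>
      have hc : c ≠ '#' := fun hh => h (hh ▸ List.mem_cons_self ..)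
      have hrs : '#' ∉ rs := fun hh => h (List.mem_cons_of_mem _ hh)
      have hsh : ¬ (c = '#' ∧ inq = false) := fun hh => hc hh.1
      rw [pvAScan]
      simp only [hsh, if_false]
      split_ifs <;> exact ih hrs ..

theorem pvProcLine_eq (line : List Char) :
    pvProcLine line = pvAScan line false none 0 line := by
  unfold pvProcLine
  split_ifs with h
  · rfl
  · exact (pvAScan_no_hash line h line false none 0).symm

theorem pvSplitNL_ne_nil (l : List Char) : pvSplitNL l ≠ [] := by
  induction l with
  | nil => simp [pvSplitNL]
  | cons c rs ih =>
      rw [pvSplitNL]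
      split_ifs
      · simp
      · cases h : pvSplitNL rs with
        | nil => exact absurd h ih
        | cons a t => simp

theorem pvSplitNL_no (l : List Char) (h : '\n' ∉ l) : pvSplitNL l = [l] := by
  induction l with
  | nil => rfl
  | cons c rs ih =>
      have hc : c ≠ '\n' := fun hh => h (hh ▸ List.mem_cons_self ..)
      have hrs : '\n' ∉ rs := fun hh => h (List.mem_cons_of_mem _ hh)
      simp [pvSplitNL, hc, ih hrs]

theorem pvSplitNL_app (l₁ : List Char) (h : '\n' ∉ l₁) (l₂ : List Char) :
    pvSplitNL (l₁ ++ '\n' :: l₂) = l₁ :: pvSplitNL l₂ := by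
  induction l₁ with
  | nil => simp [pvSplitNL]
  | cons c rs ih =>
      have hc : c ≠ '\n' := fun hh => h (hh ▸ List.mem_cons_self ..)
      have hrs : '\n' ∉ rs := fun hh => h (List.mem_cons_of_mem _ hh)
      simp [pvSplitNL, hc, ih hrs]

theorem pvFirstNL (l : List Char) (h : '\n' ∈ l) :
    ∃ l₁ l₂, l = l₁ ++ '\n' :: l₂ ∧ '\n' ∉ l₁ := by
  induction l with
  | nil => cases h
  | cons c rs ih =>
      by_cases hc : c = '\n'
      · exact ⟨[], rs, by simp [hc], by simp⟩
      · have hmem : '\n' ∈ rs := by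
          rcases List.mem_cons.mp h with h | h
          · exact absurd h.symm hc
          · exact h
        obtain ⟨l₁, l₂, he, hn⟩ := ih hmem
        refine ⟨c :: l₁, l₂, by simp [he], ?_⟩
        intro hh
        rcases List.mem_cons.mp hh with hh | hh
        · exact hc hh.symm
        · exact hn hh

theorem pvTop (n : Nat) : ∀ l : List Char, l.length ≤ n →
    pvBGo false none false none l = pvJoinNL ((pvSplitNL l).map pvProcLine) := by
  induction n with
  | zero =>
      intro l hl
      have : l = [] := List.eq_nil_of_length_eq_zero (Nat.le_zero.mp hl)
      subst this; rfl
  | succ n ih =>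
      intro l hl
      by_cases hnl : '\n' ∈ l
      · obtain ⟨l₁, l₂, he, hn⟩ := pvFirstNL l hnl
        subst he
        have ht : pvTailOK ('\n' :: l₂) := Or.inr ⟨l₂, rfl⟩
        have hcore := pvCore l₁ hn [] ('\n' :: l₂) ht false none
        simp only [List.nil_append, List.length_nil, List.getLast?_nil] at hcore
        have hlen : l₂.length ≤ n := by
          have := hl; simp only [List.length_append, List.length_cons] at this; omega
        rw [hcore, pvSplitNL_app l₁ hn l₂, ← pvProcLine_eq]
        cases hs : pvSplitNL l₂ with
        | nil => exact absurd hs (pvSplitNL_ne_nil l₂)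
        | cons a t =>
            have hb := ih l₂ hlen
            rw [hs] at hb
            simp [pvBNL, pvJoinNL, hb]
      · have ht : pvTailOK ([] : List Char) := Or.inl rfl
        have hcore := pvCore l hnl [] [] ht false none
        simp only [List.nil_append, List.append_nil, List.length_nil, List.getLast?_nil] at hcore
        rw [hcore, pvSplitNL_no l hnl, ← pvProcLine_eq]
        simp [pvJoinNL, pvBNL]

-- ===== VERDICT (by name: the statement is the Claim_ definition above) =====
theorem remove_comments_for_parsing_py_spec : Claim_equal_remove_comments_for_parsing_py := by
  intro content _
  unfold Spec_remove_comments_for_parsing_py remove_comments_for_parsing_py remove_comments_for_parsing_py_alt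
  rw [pvTop content.toList.length content.toList (le_refl _)]
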